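-- pv_equiv track=rewrite | github.com/Qihang-Zhang/customized_mkdocs | yml_merge.py | _insert_blank_lines_between_top_level_items
-- ===== SOURCE A (Python) =====
-- from typing import Any, Dict, List, Tuple
--
-- def _insert_blank_lines_between_top_level_items(yaml_text: str) -> str:
--     lines = yaml_text.splitlines()
--     new_lines: List[str] = []
--     for idx, line in enumerate(lines):
--         is_top_level = (not line.startswith(" ")) and line.strip() != ""
--         if is_top_level and new_lines:
--             if new_lines and new_lines[-1] != "":
--                 new_lines.append("")
--         new_lines.append(line)
--     return "\n".join(new_lines) + ("\n" if not yaml_text.endswith("\n") else "")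
-- ===== SOURCE B (Python) =====
-- def _insert_blank_lines_between_top_level_items(yaml_text: str) -> str:
--     # Stage 1: partition the lines into groups, a new group at every top-level line;
--     # lines before the first top-level line form the leading group.
--     groups = [[]]
--     for line in yaml_text.splitlines():
--         if not line.startswith(" ") and line.strip() != "":
--             groups.append([line])
--         else:
--             groups[-1].append(line)
--     # Stage 2: reassemble, separating adjacent groups by one blank line
--     # unless the earlier group is empty or already ends blank.
--     parts = [groups[0]]
--     for prev, g in zip(groups, groups[1:]):
--         if prev and prev[-1] != "":
--             parts.append([""])
--         parts.append(g)
--     out = [line for part in parts for line in part]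
--     return "\n".join(out) + ("\n" if not yaml_text.endswith("\n") else "")
-- ===== Notes on version B (the rewrite author's own statement) =====
-- stated objective: alternative
-- what changed: Replaced A's single accumulator pass that checks the output's last element before each top-level line with a two-stage partition-then-join: first split the lines into groups at every top-level line, then reassemble the groups inserting a blank separator whenever the preceding group ends in a non-blank line.
import Mathlib
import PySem

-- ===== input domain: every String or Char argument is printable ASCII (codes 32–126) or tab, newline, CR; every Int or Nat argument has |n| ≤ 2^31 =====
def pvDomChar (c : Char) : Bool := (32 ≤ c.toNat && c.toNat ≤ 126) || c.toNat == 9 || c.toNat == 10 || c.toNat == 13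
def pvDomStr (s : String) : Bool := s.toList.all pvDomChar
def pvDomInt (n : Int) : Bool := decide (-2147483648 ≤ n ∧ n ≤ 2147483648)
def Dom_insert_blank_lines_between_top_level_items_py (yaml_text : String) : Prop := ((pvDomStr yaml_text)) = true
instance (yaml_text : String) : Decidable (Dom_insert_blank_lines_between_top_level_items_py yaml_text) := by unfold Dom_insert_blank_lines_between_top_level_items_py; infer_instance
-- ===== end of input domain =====

-- B replaces A's single accumulator pass (which checks the output's last element before
-- every top-level line) by a two-stage partition-then-join: first split the lines into
-- groups at every top-level line, then reassemble the groups with blank separators.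
-- Objective: alternative decomposition, same cost.

-- ===== PORT A =====
-- one loop step of A: maybe insert "" (checking the accumulator's last element), then append the line
def pvStepA (new_lines : List String) (line : String) : List String :=
  let is_top_level : Prop := ¬ PySem.Str.startswith line " " = true ∧ PySem.Str.strip line ≠ ""
  let new_lines :=
    if is_top_level ∧ new_lines ≠ [] then
      if new_lines ≠ [] ∧ new_lines.getLast? ≠ some "" then new_lines ++ [""] else new_lines
    else new_lines
  new_lines ++ [line]

def insert_blank_lines_between_top_level_items_py (yaml_text : String) : String :=
  let lines := PySem.Str.splitlines yaml_text
  let new_lines := lines.foldl pvStepA []   -- enumerate's idx is unused in A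
  PySem.Str.join "\n" new_lines ++ (if ¬ PySem.Str.endswith yaml_text "\n" = true then "\n" else "")

-- ===== PORT B =====
-- stage 1 step: a top-level line opens a new group, any other line joins the last group
def pvGroupStep (groups : List (List String)) (line : String) : List (List String) :=
  if ¬ PySem.Str.startswith line " " = true ∧ PySem.Str.strip line ≠ "" then
    groups ++ [[line]]
  else
    groups.dropLast ++ [groups.getLastD [] ++ [line]]

-- stage 2 step: a blank separator before group p.2 iff the group p.1 before it ends in a non-blank line
def pvJoinStep (parts : List (List String)) (p : List String × List String) : List (List String) :=
  (if p.1 ≠ [] ∧ p.1.getLast? ≠ some "" then parts ++ [[""]] else parts) ++ [p.2]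

def insert_blank_lines_between_top_level_items_py_alt (yaml_text : String) : String :=
  let groups := (PySem.Str.splitlines yaml_text).foldl pvGroupStep [[]]
  let parts := (List.zip groups groups.tail).foldl pvJoinStep [groups.headD []]
  let out := parts.flatten
  PySem.Str.join "\n" out ++ (if ¬ PySem.Str.endswith yaml_text "\n" = true then "\n" else "")

-- ===== PRECONDITION & SPEC =====
def Spec_insert_blank_lines_between_top_level_items_py (yaml_text : String) (out : String) : Prop := out = insert_blank_lines_between_top_level_items_py_alt yaml_text
instance (yaml_text : String) (out : String) : Decidable (Spec_insert_blank_lines_between_top_level_items_py yaml_text out) := by unfold Spec_insert_blank_lines_between_top_level_items_py; infer_instance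

-- ===== CLAIM (what is proved, stated in full; the proofs are below) =====
def Claim_equal_insert_blank_lines_between_top_level_items_py : Prop := ∀ (yaml_text : String), Dom_insert_blank_lines_between_top_level_items_py yaml_text → Spec_insert_blank_lines_between_top_level_items_py yaml_text (insert_blank_lines_between_top_level_items_py yaml_text)

-- ===== LEMMAS AND PROOFS =====
-- proof-only device: the per-pair emission both ports are reduced to
def pvEmitB (p : String × String) : List String :=
  if p.1 ≠ "" ∧ PySem.Str.strip p.2 ≠ "" ∧ ¬ PySem.Str.startswith p.2 " " = true then ["", p.2]
  else [p.2]

def pvZ (ls : List String) : List String :=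
  ls.take 1 ++ (List.zip ls ls.tail).flatMap pvEmitB

def pvRender (gs : List (List String)) : List String :=
  ((List.zip gs gs.tail).foldl pvJoinStep [gs.headD []]).flatten

-- ---- A side: A's fold emits pvZ ----
lemma pvFoldA_eq (ls : List String) : ∀ (acc : List String) (p : String),
    acc.getLast? = some p →
    List.foldl pvStepA acc ls = acc ++ (List.zip (p :: ls) ls).flatMap pvEmitB := by
  induction ls with
  | nil => intro acc p _; simp
  | cons l ls ih =>
    intro acc p hlast
    have hne : acc ≠ [] := by
      intro h; rw [h] at hlast; simp at hlast
    have hstep : pvStepA acc l = acc ++ pvEmitB (p, l) := by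
      unfold pvStepA pvEmitB
      by_cases hsw : PySem.Chars.startswith l.toList [' '] = true <;>
        by_cases hst : PySem.Str.strip l = "" <;>
          by_cases hp : p = "" <;>
            simp [hne, hsw, hst, hp, hlast]
    have hlast' : (acc ++ pvEmitB (p, l)).getLast? = some l := by
      unfold pvEmitB
      split <;> simp
    calc List.foldl pvStepA acc (l :: ls)
        = List.foldl pvStepA (acc ++ pvEmitB (p, l)) ls := by rw [List.foldl_cons, hstep]
      _ = acc ++ pvEmitB (p, l) ++ (List.zip (l :: ls) ls).flatMap pvEmitB := ih _ _ hlast'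
      _ = acc ++ (List.zip (p :: l :: ls) (l :: ls)).flatMap pvEmitB := by
            simp [List.zip]

lemma pvFold_eq_Z (ls : List String) :
    List.foldl pvStepA [] ls = pvZ ls := by
  cases ls with
  | nil => simp [pvZ]
  | cons l ls =>
    have h0 : pvStepA [] l = [l] := by
      unfold pvStepA; simp
    have := pvFoldA_eq ls [l] l (by simp)
    rw [List.foldl_cons, h0, this]
    simp [pvZ, List.zip]

-- ---- generic snoc lemmas ----
lemma pvZipTailSnoc {α : Type} (xs : List α) (h : xs ≠ []) (a d : α) :
    List.zip (xs ++ [a]) ((xs ++ [a]).tail)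
      = List.zip xs xs.tail ++ [(xs.getLastD d, a)] := by
  obtain ⟨x, t, rfl⟩ : ∃ x t, xs = x :: t := by
    cases xs with | nil => exact absurd rfl h | cons x t => exact ⟨x, t, rfl⟩
  clear h
  induction t generalizing x with
  | nil => simp [List.zip]
  | cons y t ih =>
    have := ih y
    simp only [List.cons_append, List.tail_cons, List.zip_cons_cons] at this ⊢
    rw [this]
    simp

lemma pvRenderPartsSnoc (gs : List (List String)) (h : gs ≠ []) (g : List String) :
    ((List.zip (gs ++ [g]) ((gs ++ [g]).tail)).foldl pvJoinStep [(gs ++ [g]).headD []])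
      = pvJoinStep ((List.zip gs gs.tail).foldl pvJoinStep [gs.headD []]) (gs.getLastD [], g) := by
  rw [pvZipTailSnoc gs h g []]
  obtain ⟨x, t, rfl⟩ : ∃ x t, gs = x :: t := by
    cases gs with | nil => exact absurd rfl h | cons x t => exact ⟨x, t, rfl⟩
  simp

lemma pvFlattenJoinStep (parts : List (List String)) (p : List String × List String) :
    (pvJoinStep parts p).flatten
      = parts.flatten ++ (if p.1 ≠ [] ∧ p.1.getLast? ≠ some "" then [""] else []) ++ p.2 := by
  unfold pvJoinStep
  split <;> simp

lemma pvRenderSnocTop (gs : List (List String)) (h : gs ≠ []) (l : String) :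
    pvRender (gs ++ [[l]])
      = pvRender gs
        ++ (if gs.getLastD [] ≠ [] ∧ (gs.getLastD []).getLast? ≠ some "" then [""] else [])
        ++ [l] := by
  unfold pvRender
  rw [pvRenderPartsSnoc gs h [l], pvFlattenJoinStep]

lemma pvRenderLastStep (gs : List (List String)) (h : gs ≠ []) (l : String) :
    pvRender (gs.dropLast ++ [gs.getLastD [] ++ [l]]) = pvRender gs ++ [l] := by
  rcases List.eq_nil_or_concat' gs with rfl | ⟨ys, g, rfl⟩
  · exact absurd rfl h
  · have hlast : (ys ++ [g]).getLastD [] = g := by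
      simp [List.getLastD_eq_getLast?]
    have hdrop : (ys ++ [g]).dropLast = ys := by simp
    rw [hlast, hdrop]
    rcases List.eq_nil_or_concat' ys with rfl | ⟨zs, y, rfl⟩
    · simp [pvRender, List.zip]
    · have hy : zs ++ [y] ≠ [] := by simp
      unfold pvRender
      rw [pvRenderPartsSnoc _ hy (g ++ [l]), pvRenderPartsSnoc _ hy g,
        pvFlattenJoinStep, pvFlattenJoinStep]
      simp

lemma pvZSnoc (ls : List String) (h : ls ≠ []) (l : String) :
    pvZ (ls ++ [l]) = pvZ ls ++ pvEmitB (ls.getLastD "", l) := by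
  unfold pvZ
  rw [pvZipTailSnoc ls h l ""]
  obtain ⟨x, t, rfl⟩ : ∃ x t, ls = x :: t := by
    cases ls with | nil => exact absurd rfl h | cons x t => exact ⟨x, t, rfl⟩
  simp

-- ---- B side: the grouping fold renders to pvZ ----
lemma pvGroups_render (ls : List String) :
    (ls.foldl pvGroupStep [[]]) ≠ []
    ∧ ((ls.foldl pvGroupStep [[]]).getLastD []).getLast? = ls.getLast?
    ∧ pvRender (ls.foldl pvGroupStep [[]]) = pvZ ls := by
  induction ls using List.reverseRecOn with
  | nil => refine ⟨by simp, by simp, ?_⟩; simp [pvRender, pvZ, List.zip]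
  | append_singleton ls l ih =>
    rw [List.foldl_append, List.foldl_cons, List.foldl_nil]
    revert ih
    generalize List.foldl pvGroupStep [[]] ls = gs
    rintro ⟨hne, hlast, hren⟩
    by_cases htop : ¬ PySem.Str.startswith l " " = true ∧ PySem.Str.strip l ≠ ""
    · -- top-level line: a fresh group [[l]]
      rw [show pvGroupStep gs l = gs ++ [[l]] by
        unfold pvGroupStep; rw [if_pos htop]]
      refine ⟨by simp, by simp [List.getLastD_eq_getLast?], ?_⟩
      rcases List.eq_nil_or_concat' gs with rfl | ⟨zs, gl, rfl⟩
      · exact absurd rfl hne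
      have hgld : (zs ++ [gl]).getLastD [] = gl := by
        simp [List.getLastD_eq_getLast?]
      rw [hgld] at hlast
      rw [pvRenderSnocTop _ hne l, hren, hgld]
      rcases List.eq_nil_or_concat' ls with rfl | ⟨ys, a, rfl⟩
      · -- no lines yet: the leading group is empty, so no separator
        have hglnil : gl = [] := List.getLast?_eq_none_iff.mp (by simpa using hlast)
        rw [if_neg (by simp [hglnil])]
        simp [pvZ, List.zip]
      · rw [pvZSnoc _ (by simp) l]
        have hgl : gl.getLast? = some a := by simpa using hlast
        have hglne : gl ≠ [] := by
          intro hnil; rw [hnil] at hgl; simp at hgl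
        have hging : (ys ++ [a]).getLastD "" = a := by
          simp [List.getLastD_eq_getLast?]
        rw [hging]
        by_cases ha : a = ""
        · subst ha
          rw [if_neg (by simp [hgl])]
          unfold pvEmitB
          rw [if_neg (by simp)]
          simp
        · rw [if_pos ⟨hglne, by simp [hgl, ha]⟩]
          unfold pvEmitB
          rw [if_pos ⟨ha, htop.2, htop.1⟩]
          simp
    · -- continuation line: appended to the last group, no separator
      rw [show pvGroupStep gs l = gs.dropLast ++ [gs.getLastD [] ++ [l]] by
        unfold pvGroupStep; rw [if_neg htop]]
      refine ⟨by simp, by simp [List.getLastD_eq_getLast?], ?_⟩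
      rw [pvRenderLastStep gs hne l, hren]
      rcases List.eq_nil_or_concat' ls with rfl | ⟨ys, a, rfl⟩
      · simp [pvZ, List.zip]
      · rw [pvZSnoc _ (by simp) l]
        unfold pvEmitB
        rw [if_neg (by rintro ⟨-, h2, h3⟩; exact htop ⟨h3, h2⟩)]

-- ===== VERDICT (by name: the statement is the Claim_ definition above) =====
theorem insert_blank_lines_between_top_level_items_py_spec : Claim_equal_insert_blank_lines_between_top_level_items_py := by
  intro yaml_text _
  show PySem.Str.join "\n" ((PySem.Str.splitlines yaml_text).foldl pvStepA [])
        ++ (if ¬ PySem.Str.endswith yaml_text "\n" = true then "\n" else "")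
      = insert_blank_lines_between_top_level_items_py_alt yaml_text
  rw [pvFold_eq_Z, ← (pvGroups_render (PySem.Str.splitlines yaml_text)).2.2]
  rfl
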